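-- pv_equiv track=rewrite | github.com/mmcknett/advent-of-code-2024 | day-12/day-12.py | calc
-- ===== SOURCE A (Python) =====
-- from collections import defaultdict
--
-- def perim(r, c, grid):
--   result = 0
--   offsets = [(0, 1), (1, 0), (0, -1), (-1, 0)]
--   for o_r, o_c in offsets:
--     n_r, n_c = r + o_r, c + o_c
--     if (n_r < 0 or n_c < 0 or
--         n_r >= len(grid) or n_c >= len(grid[0]) or
--         grid[n_r][n_c] != grid[r][c]
--     ):
--       result += 1
--   return result
--
-- def calc(grid):
--   area = defaultdict(int)
--   perimeter = defaultdict(int)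
--
--   for r, row in enumerate(grid):
--     for c, val in enumerate(row):
--       # BUG: This doesn't allow us to group separated regions independently.
--       # Four separate Xs should have a price of 4 * 1 each, for a total of 16,
--       # but if we accumulate the area & perimeter like this, it will get 16 * 4 = 64.
--       # Regions need to be uniquely identified.
--       area[val] += 1
--       perimeter[val] += perim(r, c, grid)
--
--   return area, perimeter
-- ===== SOURCE B (Python) =====
-- from collections import defaultdict
--
-- def calc(grid):
--   # One counting pass for the areas, then perimeter = 4*area minus 2 for every
--   # shared edge between equal adjacent cells (right and down neighbours).
--   area = defaultdict(int)
--   for row in grid: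
--     for val in row:
--       area[val] += 1
--
--   perimeter = defaultdict(int)
--   for val, a in area.items():
--     perimeter[val] += 4 * a
--
--   for row in grid:                      # horizontal shared edges
--     for c in range(len(row) - 1):
--       if row[c] == row[c + 1]:
--         perimeter[row[c]] -= 2
--   for r1, r2 in zip(grid, grid[1:]):    # vertical shared edges
--     for x, y in zip(r1, r2):
--       if x == y:
--         perimeter[x] -= 2
--   return area, perimeter
-- ===== Notes on version B (the rewrite author's own statement) =====
-- stated objective: alternative
-- what changed: A calls a per-cell perim() helper probing all four neighbours with bounds checks for every cell; B counts cells per value, starts each perimeter at 4*area and subtracts 2 per equal adjacent pair in one pass over right and down neighbours. Pre_ restricts to grids that are rectangular as far as A's neighbour window reaches: it excludes ragged grids, on which A raises IndexError (a row shorter than the first) or the two programs make different but equally defensible adjacency choices past the first row's width.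
-- outside the precondition, e.g. on calc(['ab', 'a']): A raises IndexError, B returns ({'a': 2, 'b': 1}, {'a': 6, 'b': 4})
import Mathlib
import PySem

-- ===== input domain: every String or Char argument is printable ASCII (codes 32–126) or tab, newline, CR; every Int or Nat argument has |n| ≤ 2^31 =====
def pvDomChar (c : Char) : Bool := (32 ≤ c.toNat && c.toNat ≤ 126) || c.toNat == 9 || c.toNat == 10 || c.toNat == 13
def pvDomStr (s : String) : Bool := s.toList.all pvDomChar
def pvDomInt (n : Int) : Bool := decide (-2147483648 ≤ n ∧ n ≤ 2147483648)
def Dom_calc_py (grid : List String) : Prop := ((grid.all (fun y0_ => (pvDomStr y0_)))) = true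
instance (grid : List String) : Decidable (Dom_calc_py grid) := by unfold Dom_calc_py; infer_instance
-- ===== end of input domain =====

-- B replaces A's per-cell four-neighbour scan by one counting pass (perimeter starts at
-- 4*area) and one pass over adjacent equal pairs, subtracting 2 per shared edge.

-- ===== PORT A =====
-- Python dict keys are the one-character strings of the grid.
def pvKey (c : Char) : String := String.singleton c

-- grid[r][c] with Python indexing; none exactly where Python would raise IndexError
-- (perim only evaluates it after its bounds checks; inside Pre_ it is always `some`).
def pvCell (grid : List String) (r c : Int) : Option Char :=
  (PySem.List.pyGet? grid r).bind fun row => PySem.List.pyGet? row.toList c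

-- len(grid[0]); Python would raise on [] but perim is never called on an empty grid.
def pvLen0 (grid : List String) : Int :=
  match grid with
  | [] => 0
  | s :: _ => (s.toList.length : Int)

def perim_py (r c : Int) (grid : List String) : Int :=
  [((0 : Int), (1 : Int)), (1, 0), (0, -1), (-1, 0)].foldl
    (fun result o =>
      let nr := r + o.1
      let nc := c + o.2
      if nr < 0 ∨ nc < 0 ∨ (grid.length : Int) ≤ nr ∨ pvLen0 grid ≤ nc ∨
          pvCell grid nr nc ≠ pvCell grid r c
      then result + 1 else result) 0

def calc_py (grid : List String) : (List (String × Int)) × (List (String × Int)) :=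
  let st := (PySem.List.enumerate grid).foldl
    (fun (st : PySem.Dict String Int × PySem.Dict String Int) rrow =>
      (PySem.List.enumerate rrow.2.toList).foldl
        (fun st cval =>
          (st.1.modify (pvKey cval.2) 0 (· + 1),
           st.2.modify (pvKey cval.2) 0 (· + perim_py rrow.1 cval.1 grid))) st)
    (PySem.Dict.empty, PySem.Dict.empty)
  (st.1.items, st.2.items)

-- ===== PORT B =====
def calc_py_alt (grid : List String) : (List (String × Int)) × (List (String × Int)) :=
  let area : PySem.Dict String Int := grid.foldl
    (fun d row => row.toList.foldl (fun d v => d.modify (pvKey v) 0 (· + 1)) d)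
    PySem.Dict.empty
  let per1 : PySem.Dict String Int := area.items.foldl
    (fun d kv => d.modify kv.1 0 (· + 4 * kv.2)) PySem.Dict.empty
  -- indices cc in range(len(row)-1) are always in range: pyGetD is exact here
  let per2 : PySem.Dict String Int := grid.foldl
    (fun d row => (PySem.List.pyRange 0 ((row.toList.length : Int) - 1) 1).foldl
      (fun d cc =>
        if PySem.List.pyGetD row.toList cc 'a' = PySem.List.pyGetD row.toList (cc + 1) 'a'
        then d.modify (pvKey (PySem.List.pyGetD row.toList cc 'a')) 0 (· - 2)
        else d) d) per1
  let per3 : PySem.Dict String Int := (grid.zip (PySem.List.slice grid (some 1) none)).foldl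
    (fun d rr => (rr.1.toList.zip rr.2.toList).foldl
      (fun d p => if p.1 = p.2 then d.modify (pvKey p.1) 0 (· - 2) else d) d) per2
  (area.items, per3.items)

-- ===== PRECONDITION & SPEC =====
-- The function is meant for rectangular grids; Pre_ admits every grid on which A and B
-- observably coincide and excludes the ragged ones where they cannot: grids with a row
-- shorter than the first (A raises IndexError there) and grids with an equal adjacent
-- pair reaching past the first row's width, where A's len(grid[0]) neighbour window and
-- B's full-row adjacency are two equally defensible choices on unspecified input.
def Pre_calc_py (grid : List String) : Prop :=
  (∀ s ∈ grid, (grid.headD "").toList.length ≤ s.toList.length) ∧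
  (∀ row ∈ grid, ∀ j ∈ List.range (row.toList.length - 1),
      row.toList[j]? = row.toList[j+1]? → j + 1 < (grid.headD "").toList.length) ∧
  (∀ rr ∈ grid.zip grid.tail, ∀ j ∈ List.range (min rr.1.toList.length rr.2.toList.length),
      rr.1.toList[j]? = rr.2.toList[j]? → j < (grid.headD "").toList.length)
instance (grid : List String) : Decidable (Pre_calc_py grid) := by unfold Pre_calc_py; infer_instance

def pvWitness_calc_py : List String := ["ab", "ba"]

def Spec_calc_py (grid : List String) (out : (List (String × Int)) × (List (String × Int))) : Prop := out = calc_py_alt grid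
instance (grid : List String) (out : (List (String × Int)) × (List (String × Int))) : Decidable (Spec_calc_py grid out) := by unfold Spec_calc_py; infer_instance

-- ===== CLAIM (what is proved, stated in full; the proofs are below) =====
def Claim_equal_calc_py : Prop := ∀ (grid : List String), Dom_calc_py grid → Pre_calc_py grid → Spec_calc_py grid (calc_py grid)

-- ===== LEMMAS AND PROOFS =====

-- proof-side abbreviations ------------------------------------------------
def pvVals (grid : List String) : List Char := grid.flatMap (fun s => s.toList)
def pvKeysL (grid : List String) : List String := (pvVals grid).map pvKey
def pvW0 (grid : List String) : Nat := (grid.headD "").toList.length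
def pvCells (grid : List String) : List (Int × Int × Char) :=
  ((PySem.List.enumerate grid).map
    (fun rp => (PySem.List.enumerate rp.2.toList).map (fun cv => (rp.1, cv.1, cv.2)))).flatten
def pvCellN (grid : List String) (rn i : Nat) : Option Char :=
  grid[rn]?.bind fun s => s.toList[i]?
def icnt (b : Bool) : Int := if b then 1 else 0
def pvEqPairs (l1 l2 : List Char) : List (Char × Char) := (l1.zip l2).filter (fun p => decide (p.1 = p.2))
-- horizontal removals of one row as A counts them: an equal pair (j, j+1) removes one
-- edge per endpoint lying in the column window [0, w0)
def pvHrow (w0 : Nat) (l : List Char) (c : Char) : Int :=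
  ((List.range (l.length - 1)).map (fun j =>
    if l[j]? = some c ∧ l[j+1]? = some c
    then ((if j < w0 then (1 : Int) else 0) + (if j+1 < w0 then (1 : Int) else 0))
    else 0)).sum
-- horizontal removals as B counts them: 2 per equal pair
def pvHcnt (row : String) (c : Char) : Int :=
  ((List.range (row.toList.length - 1)).map (fun j =>
    if row.toList[j]? = some c ∧ row.toList[j+1]? = some c then (2 : Int) else 0)).sum
-- vertical removals between rows rn and rn+1, inside A's window
def pvVD (w0 : Nat) (grid : List String) (c : Char) (rn : Nat) : Int :=
  (((((grid[rn]?.getD "").toList.take w0)).zip (((grid[rn+1]?.getD "").toList.take w0))).countP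
    (fun p => p.1 == c && p.2 == c) : Int)

def dArea (grid : List String) : PySem.Dict String Int :=
  (pvVals grid).foldl (fun d v => d.modify (pvKey v) 0 (· + 1)) PySem.Dict.empty
def dPerA (grid : List String) : PySem.Dict String Int :=
  (pvCells grid).foldl (fun d t => d.modify (pvKey t.2.2) 0 (· + perim_py t.1 t.2.1 grid)) PySem.Dict.empty
def dPerB1 (grid : List String) : PySem.Dict String Int :=
  (dArea grid).items.foldl (fun d kv => d.modify kv.1 0 (· + 4 * kv.2)) PySem.Dict.empty
def pvHlist (row : String) : List (String × Nat) :=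
  ((List.range (row.toList.length - 1)).filter
    (fun j => decide (row.toList.getD j 'a' = row.toList.getD (j+1) 'a'))).map (fun j => (row, j))
def dPerB2 (grid : List String) : PySem.Dict String Int :=
  ((grid.map pvHlist).flatten).foldl
    (fun d rj => d.modify (pvKey (rj.1.toList.getD rj.2 'a')) 0 (· + (-2)))
    (dPerB1 grid)
def dPerB3 (grid : List String) : PySem.Dict String Int :=
  (((grid.zip grid.tail).map
      (fun rr => pvEqPairs rr.1.toList rr.2.toList)).flatten).foldl
    (fun d p => d.modify (pvKey p.1) 0 (· + (-2))) (dPerB2 grid)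

-- structural rewrites of the two ports ------------------------------------
lemma pvKey_inj {a b : Char} (h : pvKey a = pvKey b) : a = b := by
  have := congrArg String.toList h; simpa [pvKey] using this

lemma pv_foldl_enum_snd {α β : Type} (l : List α) (F : β → α → β) (d : β) :
    (PySem.List.enumerate l).foldl (fun acc p => F acc p.2) d = l.foldl F d := by
  conv_rhs => rw [← PySem.List.map_snd_enumerate l 0]
  rw [List.foldl_map]

lemma pv_foldl_flat {α β γ : Type} (L : List α) (g : α → List β) (f : γ → β → γ) (init : γ) :
    L.foldl (fun acc x => (g x).foldl f acc) init = ((L.map g).flatten).foldl f init := by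
  rw [List.foldl_flatten, List.foldl_map]

lemma pv_vals_flatten (grid : List String) :
    pvVals grid = (grid.map (fun s => s.toList)).flatten := by
  simp [pvVals, List.flatMap_def]

lemma dArea_eq (grid : List String) :
    grid.foldl (fun d row => row.toList.foldl
        (fun d v => d.modify (pvKey v) 0 (· + 1)) d) PySem.Dict.empty = dArea grid := by
  rw [pv_foldl_flat grid (fun (row : String) => row.toList), dArea, pv_vals_flatten]

lemma calc_py_eq (grid : List String) :
    calc_py grid = ((dArea grid).items, (dPerA grid).items) := by
  have hpair : ∀ (L : List (Int × String)) (a p : PySem.Dict String Int),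
      L.foldl (fun st rrow => (PySem.List.enumerate rrow.2.toList).foldl
        (fun st cval => (st.1.modify (pvKey cval.2) 0 (· + 1),
          st.2.modify (pvKey cval.2) 0 (· + perim_py rrow.1 cval.1 grid))) st) (a, p)
      = (L.foldl (fun d rrow => (PySem.List.enumerate rrow.2.toList).foldl
            (fun d cval => d.modify (pvKey cval.2) 0 (· + 1)) d) a,
         L.foldl (fun d rrow => (PySem.List.enumerate rrow.2.toList).foldl
            (fun d cval => d.modify (pvKey cval.2) 0 (· + perim_py rrow.1 cval.1 grid)) d) p) := by
    intro L
    induction L with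
    | nil => intro a p; rfl
    | cons x t ih =>
        intro a p
        simp only [List.foldl_cons]
        rw [PySem.List.foldl_prod_mk (fun d cval => d.modify (pvKey cval.2) 0 (· + 1))
          (fun d cval => d.modify (pvKey cval.2) 0 (· + perim_py x.1 cval.1 grid))
          (PySem.List.enumerate x.2.toList) a p]
        exact ih _ _
  have harea : (PySem.List.enumerate grid).foldl (fun d rrow =>
        (PySem.List.enumerate rrow.2.toList).foldl
          (fun d cval => d.modify (pvKey cval.2) 0 (· + 1)) d) PySem.Dict.empty
      = dArea grid := by
    have h1 : ∀ (acc : PySem.Dict String Int) (rrow : Int × String), rrow ∈ PySem.List.enumerate grid →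
        (PySem.List.enumerate rrow.2.toList).foldl
            (fun d cval => d.modify (pvKey cval.2) 0 (· + 1)) acc
          = rrow.2.toList.foldl (fun d v => d.modify (pvKey v) 0 (· + 1)) acc := by
      intro acc rrow _
      exact pv_foldl_enum_snd rrow.2.toList (fun d v => d.modify (pvKey v) 0 (· + 1)) acc
    rw [PySem.List.foldl_congr_mem _ _ _ _ h1,
      pv_foldl_enum_snd grid (fun (d : PySem.Dict String Int) (row : String) =>
        row.toList.foldl (fun d v => d.modify (pvKey v) 0 (· + 1)) d),
      dArea_eq]
  have hper : (PySem.List.enumerate grid).foldl (fun d rrow =>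
        (PySem.List.enumerate rrow.2.toList).foldl
          (fun d cval => d.modify (pvKey cval.2) 0 (· + perim_py rrow.1 cval.1 grid)) d) PySem.Dict.empty
      = dPerA grid := by
    have h1 : ∀ (acc : PySem.Dict String Int) (rrow : Int × String), rrow ∈ PySem.List.enumerate grid →
        (PySem.List.enumerate rrow.2.toList).foldl
            (fun d cval => d.modify (pvKey cval.2) 0 (· + perim_py rrow.1 cval.1 grid)) acc
          = ((PySem.List.enumerate rrow.2.toList).map (fun cv => (rrow.1, cv.1, cv.2))).foldl
              (fun d t => d.modify (pvKey t.2.2) 0 (· + perim_py t.1 t.2.1 grid)) acc := by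
      intro acc rrow _
      rw [List.foldl_map]
    rw [PySem.List.foldl_congr_mem _ _ _ _ h1,
      pv_foldl_flat (PySem.List.enumerate grid)
        (fun (rrow : Int × String) => (PySem.List.enumerate rrow.2.toList).map (fun cv => (rrow.1, cv.1, cv.2)))]
    rfl
  simp only [calc_py]
  rw [hpair, harea, hper]

lemma calc_py_alt_eq (grid : List String) :
    calc_py_alt grid = ((dArea grid).items, (dPerB3 grid).items) := by
  simp only [calc_py_alt, PySem.List.slice_from_one, sub_eq_add_neg,
    PySem.List.foldl_ite_eq_foldl_filter, dArea_eq]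
  congr 1
  -- horizontal pass: turn the pyRange index loop of each row into pvHlist
  have hrow : ∀ (acc : PySem.Dict String Int) (row : String), row ∈ grid →
      (List.filter (fun cc => decide (PySem.List.pyGetD row.toList cc 'a'
            = PySem.List.pyGetD row.toList (cc + 1) 'a'))
          (PySem.List.pyRange 0 ((row.toList.length : Int) + -1) 1)).foldl
        (fun d cc => d.modify (pvKey (PySem.List.pyGetD row.toList cc 'a')) 0 (· + (-2))) acc
      = (pvHlist row).foldl
          (fun d rj => d.modify (pvKey (rj.1.toList.getD rj.2 'a')) 0 (· + (-2))) acc := by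
    intro acc row _
    rw [pvHlist, List.foldl_map]
    have hr : PySem.List.pyRange 0 ((row.toList.length : Int) + -1) 1
        = (List.range (row.toList.length - 1)).map (fun k : Nat => (k : Int)) := by
      rw [PySem.List.pyRange_one]
      have : (((row.toList.length : Int) + -1) - 0).toNat = row.toList.length - 1 := by omega
      rw [this]
      apply List.map_congr_left
      intro k _
      omega
    rw [hr, List.filter_map, List.foldl_map]
    have hfil : List.filter
        ((fun cc => decide (PySem.List.pyGetD row.toList cc 'a' = PySem.List.pyGetD row.toList (cc + 1) 'a'))
          ∘ (fun k : Nat => (k : Int)))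
        (List.range (row.toList.length - 1))
        = List.filter (fun j => decide (row.toList.getD j 'a' = row.toList.getD (j+1) 'a'))
            (List.range (row.toList.length - 1)) := by
      apply List.filter_congr
      intro j _
      simp only [Function.comp_def]
      have h2 : PySem.List.pyGetD row.toList ((j : Int) + 1) 'a' = row.toList.getD (j+1) 'a' := by
        rw [show ((j : Int) + 1) = (((j+1 : Nat)) : Int) by push_cast; ring,
          PySem.List.pyGetD_natCast]
      rw [h2]
      simp
    rw [hfil]
    apply PySem.List.foldl_congr_mem
    intro d j _
    have h1 : PySem.List.pyGetD row.toList ((j : Int)) 'a' = row.toList.getD j 'a' := by simp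
    rw [h1]
  rw [PySem.List.foldl_congr_mem _ _ _ _ hrow, pv_foldl_flat grid pvHlist]
  -- vertical pass
  rw [pv_foldl_flat (grid.zip grid.tail)
    (fun (rr : String × String) => (rr.1.toList.zip rr.2.toList).filter (fun p => decide (p.1 = p.2)))]
  simp only [dPerB3, dPerB2, dPerB1, pvEqPairs]

-- generic fold/sum lemmas -------------------------------------------------
lemma pv_getD_fold {α : Type} (l : List α) (key : α → String) (δ : α → Int)
    (d : PySem.Dict String Int) (k : String) :
    (l.foldl (fun d x => d.modify (key x) 0 (fun v => v + δ x)) d).getD k 0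
      = d.getD k 0 + (l.map (fun x => if key x = k then δ x else 0)).sum := by
  induction l generalizing d with
  | nil => simp
  | cons a t ih =>
      simp only [List.foldl_cons, List.map_cons, List.sum_cons, ih]
      rw [PySem.Dict.getD_modify]
      by_cases h : k = key a
      · subst h; simp; ring
      · rw [if_neg h, if_neg (fun hh : key a = k => h hh.symm)]; ring

lemma pv_sum_ite_const {α : Type} (l : List α) (p : α → Prop) [DecidablePred p] (a : Int) :
    (l.map (fun x => if p x then a else 0)).sum = a * (l.countP (fun x => decide (p x)) : Int) := by
  induction l with
  | nil => simp
  | cons x t ih =>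
      by_cases h : p x <;> simp [h, ih] <;> ring

lemma pv_sum_dedup {α : Type} [DecidableEq α] (s : List α) (hnd : s.Nodup) (k : α) (f : α → Int) :
    (s.map (fun j => if j = k then f j else 0)).sum = if k ∈ s then f k else 0 := by
  induction s with
  | nil => simp
  | cons a t ih =>
      have ha : a ∉ t := (List.nodup_cons.mp hnd).1
      have ht : t.Nodup := (List.nodup_cons.mp hnd).2
      by_cases h : a = k
      · subst h
        simp [ih ht, if_neg ha, List.mem_cons]
      · have h3 : (k = a ∨ k ∈ t) ↔ k ∈ t :=
          ⟨fun hh => hh.resolve_left (fun e => h e.symm), Or.inr⟩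
        have h2 : ((a = k) = False) := by simp [h]
        simp [h2, ih ht, List.mem_cons, h3]

lemma pv_sum_sub {α : Type} (l : List α) (f g : α → Int) :
    (l.map (fun x => f x - g x)).sum = (l.map f).sum - (l.map g).sum := by
  induction l with
  | nil => simp
  | cons x t ih => simp [ih]; ring

lemma pv_sum_add {α : Type} (l : List α) (f g : α → Int) :
    (l.map (fun x => f x + g x)).sum = (l.map f).sum + (l.map g).sum := by
  induction l with
  | nil => simp
  | cons x t ih => simp [ih]; ring

lemma pv_sum_neg {α : Type} (l : List α) (f : α → Int) :
    (l.map (fun x => -(f x))).sum = -((l.map f).sum) := by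
  induction l with
  | nil => simp
  | cons a t ih => simp only [List.map_cons, List.sum_cons, ih]; ring

lemma pv_sum_filter {α : Type} (l : List α) (p : α → Bool) (F : α → Int) :
    ((l.filter p).map F).sum = (l.map (fun x => if p x then F x else 0)).sum := by
  induction l with
  | nil => simp
  | cons a t ih =>
      by_cases h : p a <;> simp [List.filter_cons, h, ih]

lemma pv_sum_shift (g : Nat → Int) (n : Nat) (h0 : g 0 = 0) :
    ((List.range n).map g).sum = ((List.range (n-1)).map (fun j => g (j+1))).sum := by
  cases n with
  | zero => simp
  | succ m => rw [List.range_succ_eq_map]; simp [h0, List.map_map]; rfl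

lemma pv_sum_top (g : Nat → Int) (n : Nat) (h : g n = 0) :
    ((List.range (n+1)).map g).sum = ((List.range n).map g).sum := by
  rw [List.range_succ]; simp [h]

lemma pv_sum_range_ext (g : Nat → Int) (m N : Nat) (hmN : m ≤ N)
    (h : ∀ i, m ≤ i → g i = 0) :
    ((List.range N).map g).sum = ((List.range m).map g).sum := by
  induction N with
  | zero => have : m = 0 := by omega
            rw [this]
  | succ k ih =>
      by_cases hk : m = k + 1
      · rw [hk]
      · have hmk : m ≤ k := by omega
        rw [pv_sum_top g k (h k hmk), ih hmk]

lemma pv_sum_range_getD {α : Type} (l : List α) (d : α) (f : α → Int) :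
    ((List.range l.length).map (fun rn => f (l.getD rn d))).sum = (l.map f).sum := by
  induction l with
  | nil => simp
  | cons a t ih =>
      rw [List.length_cons, List.range_succ_eq_map]
      simp only [List.map_cons, List.map_map, List.sum_cons, Function.comp_def,
        List.getD_cons_zero, List.getD_cons_succ]
      rw [ih]

lemma pv_cnt_rows (grid : List String) (c : Char) :
    (grid.map (fun row => (row.toList.count c : Int))).sum = ((pvVals grid).count c : Int) := by
  induction grid with
  | nil => simp [pvVals]
  | cons s rest ih =>
      have : pvVals (s :: rest) = s.toList ++ pvVals rest := by simp [pvVals]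
      rw [this, List.count_append]
      simp only [List.map_cons, List.sum_cons, ih]
      push_cast
      ring

lemma pv_cntP_pairs (l1 l2 : List Char) (c : Char) :
    (pvEqPairs l1 l2).countP (fun p => decide (pvKey p.1 = pvKey c))
      = (l1.zip l2).countP (fun p => p.1 == c && p.2 == c) := by
  rw [pvEqPairs, List.countP_filter]
  apply List.countP_congr
  intro p _
  rcases p with ⟨a, b⟩
  have hki : (pvKey a = pvKey c) ↔ (a = c) := ⟨pvKey_inj, fun h => by rw [h]⟩
  by_cases h1 : a = c
  · by_cases h2 : b = c
    · have h3 : a = b := by rw [h1, h2]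
      simp [hki, h1, h2, h3]
    · have h3 : ¬ c = b := fun h => h2 h.symm
      simp [hki, h1, h2, h3]
  · simp [hki, h1]

lemma pv_sum_count' {α : Type} [BEq α] [LawfulBEq α] (l : List α) (x : α) :
    ((List.range l.length).map (fun i => icnt (l[i]? == some x))).sum = (l.count x : Int) := by
  induction l with
  | nil => simp
  | cons a t ih =>
      rw [List.length_cons, List.range_succ_eq_map]
      simp only [List.map_cons, List.map_map, List.sum_cons, Function.comp_def,
        List.getElem?_cons_succ, List.getElem?_cons_zero, ih, List.count_cons]
      by_cases h : a = x <;> simp [icnt, h, beq_iff_eq] <;> push_cast <;> ring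

-- window-bounded column count ---------------------------------------------
lemma pv_countZipW (l1 l2 : List Char) (w0 : Nat) (c : Char) (N : Nat)
    (h : min w0 (min l1.length l2.length) ≤ N) :
    ((List.range N).map (fun i =>
        icnt (decide (i < w0) && ((l1[i]? == some c) && (l2[i]? == some c))))).sum
      = (((l1.take w0).zip (l2.take w0)).countP (fun p => p.1 == c && p.2 == c) : Int) := by
  have hpt : ∀ i : Nat,
      icnt (decide (i < w0) && ((l1[i]? == some c) && (l2[i]? == some c)))
      = icnt (((l1.take w0).zip (l2.take w0))[i]? == some (c, c)) := by
    intro i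
    have hz : ((l1.take w0).zip (l2.take w0))[i]?
        = match (l1.take w0)[i]?, (l2.take w0)[i]? with
          | some a, some b => some (a, b)
          | _, _ => none := by
      rw [List.zip_eq_zipWith, List.getElem?_zipWith]
      cases (List.take w0 l1)[i]? <;> cases (List.take w0 l2)[i]? <;> rfl
    rw [hz, List.getElem?_take, List.getElem?_take]
    by_cases hw : i < w0
    · rw [if_pos hw, if_pos hw, decide_eq_true hw, Bool.true_and]
      cases h1 : l1[i]? with
      | none => simp [icnt]
      | some a =>
          cases h2 : l2[i]? with
          | none => simp [icnt]
          | some b =>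
              by_cases ha : a = c <;> by_cases hb : b = c <;>
                simp [icnt, ha, hb, Prod.ext_iff]
    · rw [if_neg hw, if_neg hw]
      simp [decide_eq_false hw, icnt]
  simp only [hpt]
  have hlen : ((l1.take w0).zip (l2.take w0)).length ≤ N := by
    rw [List.length_zip, List.length_take, List.length_take]
    omega
  have hzero : ∀ i, ((l1.take w0).zip (l2.take w0)).length ≤ i →
      icnt (((l1.take w0).zip (l2.take w0))[i]? == some (c, c)) = 0 := by
    intro i hi
    rw [List.getElem?_eq_none_iff.mpr hi]
    simp [icnt]
  rw [pv_sum_range_ext _ _ N hlen hzero]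
  rw [pv_sum_count' ((l1.take w0).zip (l2.take w0)) (c, c)]
  have hcc : ((l1.take w0).zip (l2.take w0)).count (c, c)
      = ((l1.take w0).zip (l2.take w0)).countP (fun p => p.1 == c && p.2 == c) := by
    rw [List.count_eq_countP]
    apply List.countP_congr
    intro p _
    rcases p with ⟨a, b⟩
    rfl
  rw [hcc]

-- rectangularity facts ----------------------------------------------------
lemma pvCellN_eq (grid : List String) {rn : Nat} {row : String} (hrow : grid[rn]? = some row)
    (i : Nat) : pvCellN grid rn i = row.toList[i]? := by
  simp [pvCellN, hrow]

lemma pvCellN_getD (grid : List String) (a i : Nat) :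
    pvCellN grid a i = (grid[a]?.getD "").toList[i]? := by
  cases h : grid[a]? <;> simp [pvCellN, h]

-- the per-cell perimeter, evaluated ---------------------------------------
lemma perim_eval (grid : List String) (rn i : Nat) (c : Char)
    (hc : pvCellN grid rn i = some c) :
    perim_py rn i grid
      = 4 - icnt (decide (i+1 < pvW0 grid) && (pvCellN grid rn (i+1) == some c))
          - icnt (decide (i < pvW0 grid) && (pvCellN grid (rn+1) i == some c))
          - icnt (decide (1 ≤ i) && (decide (i-1 < pvW0 grid) && (pvCellN grid rn (i-1) == some c)))
          - icnt (decide (1 ≤ rn) && (decide (i < pvW0 grid) && (pvCellN grid (rn-1) i == some c))) := by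
  obtain ⟨row, hrow, hri⟩ : ∃ row, grid[rn]? = some row ∧ row.toList[i]? = some c := by
    simp only [pvCellN, Option.bind_eq_some_iff] at hc
    rcases hc with ⟨row, hrow, hri⟩
    exact ⟨row, hrow, hri⟩
  have hrn : rn < grid.length := by
    by_contra hcon
    rw [List.getElem?_eq_none_iff.mpr (by omega)] at hrow; cases hrow
  have hne : grid ≠ [] := by intro h; subst h; simp at hrn
  have hlen0 : pvLen0 grid = (pvW0 grid : Int) := by
    cases grid with
    | nil => exact absurd rfl hne
    | cons s rest => rfl
  have hcell : ∀ (a b : Nat), pvCell grid (a : Int) (b : Int) = pvCellN grid a b := by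
    intro a b; simp [pvCell, pvCellN]
  have e1 : ((rn : Int) + 0 < 0 ∨ (i : Int) + 1 < 0 ∨ (grid.length : Int) ≤ (rn : Int) + 0 ∨
        pvLen0 grid ≤ (i : Int) + 1 ∨
        pvCell grid ((rn : Int) + 0) ((i : Int) + 1) ≠ pvCell grid (rn : Int) (i : Int))
      ↔ ¬ (i+1 < pvW0 grid ∧ pvCellN grid rn (i+1) = some c) := by
    rw [hlen0]
    have hx : pvCell grid ((rn : Int) + 0) ((i : Int) + 1) = pvCellN grid rn (i+1) := by
      rw [show ((rn : Int) + 0) = ((rn : Nat) : Int) by push_cast; ring,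
        show ((i : Int) + 1) = (((i+1 : Nat)) : Int) by push_cast; ring, hcell]
    rw [hx, hcell, hc]
    constructor
    · rintro (h | h | h | h | h) <;> rintro ⟨h1, h2⟩
      · omega
      · omega
      · omega
      · omega
      · exact h h2
    · intro h
      by_cases hb : (i+1) < pvW0 grid
      · exact Or.inr (Or.inr (Or.inr (Or.inr (fun hh => h ⟨hb, hh⟩))))
      · exact Or.inr (Or.inr (Or.inr (Or.inl (by omega))))
  have e2 : ((rn : Int) + 1 < 0 ∨ (i : Int) + 0 < 0 ∨ (grid.length : Int) ≤ (rn : Int) + 1 ∨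
        pvLen0 grid ≤ (i : Int) + 0 ∨
        pvCell grid ((rn : Int) + 1) ((i : Int) + 0) ≠ pvCell grid (rn : Int) (i : Int))
      ↔ ¬ (i < pvW0 grid ∧ pvCellN grid (rn+1) i = some c) := by
    rw [hlen0]
    have hx : pvCell grid ((rn : Int) + 1) ((i : Int) + 0) = pvCellN grid (rn+1) i := by
      rw [show ((rn : Int) + 1) = (((rn+1 : Nat)) : Int) by push_cast; ring,
        show ((i : Int) + 0) = ((i : Nat) : Int) by push_cast; ring, hcell]
    rw [hx, hcell, hc]
    constructor
    · rintro (h | h | h | h | h) <;> rintro ⟨h1, h2⟩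
      · omega
      · omega
      · have : grid[rn+1]? = none := List.getElem?_eq_none_iff.mpr (by omega)
        rw [pvCellN, this] at h2; cases h2
      · omega
      · exact h h2
    · intro h
      by_cases hb : i < pvW0 grid
      · exact Or.inr (Or.inr (Or.inr (Or.inr (fun hh => h ⟨hb, hh⟩))))
      · exact Or.inr (Or.inr (Or.inr (Or.inl (by omega))))
  have e3 : ((rn : Int) + 0 < 0 ∨ (i : Int) + -1 < 0 ∨ (grid.length : Int) ≤ (rn : Int) + 0 ∨
        pvLen0 grid ≤ (i : Int) + -1 ∨
        pvCell grid ((rn : Int) + 0) ((i : Int) + -1) ≠ pvCell grid (rn : Int) (i : Int))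
      ↔ ¬ (1 ≤ i ∧ (i-1 < pvW0 grid ∧ pvCellN grid rn (i-1) = some c)) := by
    rw [hlen0]
    constructor
    · rintro (h | h | h | h | h) <;> rintro ⟨h1, h2, h3⟩
      · omega
      · omega
      · omega
      · omega
      · apply h
        rw [show ((rn : Int) + 0) = ((rn : Nat) : Int) by push_cast; ring,
          show ((i : Int) + -1) = (((i-1 : Nat)) : Int) by push_cast [h1]; ring, hcell, hcell, hc, h3]
    · intro h
      by_cases h1 : 1 ≤ i
      · by_cases hb : i - 1 < pvW0 grid
        · refine Or.inr (Or.inr (Or.inr (Or.inr ?_)))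
          rw [show ((rn : Int) + 0) = ((rn : Nat) : Int) by push_cast; ring,
            show ((i : Int) + -1) = (((i-1 : Nat)) : Int) by push_cast [h1]; ring, hcell, hcell, hc]
          exact fun hh => h ⟨h1, hb, hh⟩
        · exact Or.inr (Or.inr (Or.inr (Or.inl (by omega))))
      · exact Or.inr (Or.inl (by omega))
  have e4 : ((rn : Int) + -1 < 0 ∨ (i : Int) + 0 < 0 ∨ (grid.length : Int) ≤ (rn : Int) + -1 ∨
        pvLen0 grid ≤ (i : Int) + 0 ∨
        pvCell grid ((rn : Int) + -1) ((i : Int) + 0) ≠ pvCell grid (rn : Int) (i : Int))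
      ↔ ¬ (1 ≤ rn ∧ (i < pvW0 grid ∧ pvCellN grid (rn-1) i = some c)) := by
    rw [hlen0]
    constructor
    · rintro (h | h | h | h | h) <;> rintro ⟨h1, h2, h3⟩
      · omega
      · omega
      · omega
      · omega
      · apply h
        rw [show ((rn : Int) + -1) = (((rn-1 : Nat)) : Int) by push_cast [h1]; ring,
          show ((i : Int) + 0) = ((i : Nat) : Int) by push_cast; ring, hcell, hcell, hc, h3]
    · intro h
      by_cases h1 : 1 ≤ rn
      · by_cases hb : i < pvW0 grid
        · refine Or.inr (Or.inr (Or.inr (Or.inr ?_)))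
          rw [show ((rn : Int) + -1) = (((rn-1 : Nat)) : Int) by push_cast [h1]; ring,
            show ((i : Int) + 0) = ((i : Nat) : Int) by push_cast; ring, hcell, hcell, hc]
          exact fun hh => h ⟨h1, hb, hh⟩
        · exact Or.inr (Or.inr (Or.inr (Or.inl (by omega))))
      · exact Or.inl (by omega)
  simp only [perim_py, List.foldl_cons, List.foldl_nil]
  rw [if_congr e1 rfl rfl, if_congr e2 rfl rfl, if_congr e3 rfl rfl, if_congr e4 rfl rfl]
  have r1 : icnt (decide (i+1 < pvW0 grid) && (pvCellN grid rn (i+1) == some c))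
      = if i+1 < pvW0 grid ∧ pvCellN grid rn (i+1) = some c then 1 else 0 := by
    by_cases hA : i+1 < pvW0 grid <;> by_cases hB : pvCellN grid rn (i+1) = some c <;>
      simp [icnt, hA, hB]
  have r2 : icnt (decide (i < pvW0 grid) && (pvCellN grid (rn+1) i == some c))
      = if i < pvW0 grid ∧ pvCellN grid (rn+1) i = some c then 1 else 0 := by
    by_cases hA : i < pvW0 grid <;> by_cases hB : pvCellN grid (rn+1) i = some c <;>
      simp [icnt, hA, hB]
  have r3 : icnt (decide (1 ≤ i) && (decide (i-1 < pvW0 grid) && (pvCellN grid rn (i-1) == some c)))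
      = if 1 ≤ i ∧ (i-1 < pvW0 grid ∧ pvCellN grid rn (i-1) = some c) then 1 else 0 := by
    by_cases hA : 1 ≤ i <;> by_cases hB : i-1 < pvW0 grid <;>
      by_cases hC : pvCellN grid rn (i-1) = some c <;> simp [icnt, hA, hB, hC]
  have r4 : icnt (decide (1 ≤ rn) && (decide (i < pvW0 grid) && (pvCellN grid (rn-1) i == some c)))
      = if 1 ≤ rn ∧ (i < pvW0 grid ∧ pvCellN grid (rn-1) i = some c) then 1 else 0 := by
    by_cases hA : 1 ≤ rn <;> by_cases hB : i < pvW0 grid <;>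
      by_cases hC : pvCellN grid (rn-1) i = some c <;> simp [icnt, hA, hB, hC]
  rw [r1, r2, r3, r4]
  split_ifs <;> omega

-- per-row sum -------------------------------------------------------------
lemma pv_rowContrib (grid : List String) (rn : Nat) (row : String)
    (hrow : grid[rn]? = some row) (c : Char) :
    ((List.range row.toList.length).map
        (fun i : Nat => if row.toList[i]? = some c then perim_py (rn : Int) (i : Int) grid else 0)).sum
      = 4 * (row.toList.count c : Int) - pvHrow (pvW0 grid) row.toList c
        - pvVD (pvW0 grid) grid c rn - (if 1 ≤ rn then pvVD (pvW0 grid) grid c (rn-1) else 0) := by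
  have hpt : ∀ i ∈ List.range row.toList.length,
      (if row.toList[i]? = some c then perim_py (rn : Int) (i : Int) grid else 0)
      = 4 * icnt (pvCellN grid rn i == some c)
        - icnt (decide (i+1 < pvW0 grid) && ((pvCellN grid rn i == some c) && (pvCellN grid rn (i+1) == some c)))
        - icnt (decide (i < pvW0 grid) && ((pvCellN grid rn i == some c) && (pvCellN grid (rn+1) i == some c)))
        - icnt (decide (1 ≤ i) && (decide (i-1 < pvW0 grid) && ((pvCellN grid rn (i-1) == some c) && (pvCellN grid rn i == some c))))
        - icnt (decide (1 ≤ rn) && (decide (i < pvW0 grid) && ((pvCellN grid (rn-1) i == some c) && (pvCellN grid rn i == some c)))) := by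
    intro i _
    have hcell : pvCellN grid rn i = row.toList[i]? := pvCellN_eq grid hrow i
    by_cases hic : row.toList[i]? = some c
    · rw [if_pos hic, perim_eval grid rn i c (by rw [hcell, hic])]
      have h1 : (pvCellN grid rn i == some c) = true := by simp [hcell, hic]
      simp [h1, Bool.true_and, Bool.and_true, icnt]
    · rw [if_neg hic]
      have h1 : (pvCellN grid rn i == some c) = false := by simp [hcell, hic]
      simp only [h1, Bool.false_and, Bool.and_false, mul_zero, icnt, if_false, Bool.false_eq_true]
      norm_num
  rw [List.map_congr_left hpt]
  rw [pv_sum_sub, pv_sum_sub, pv_sum_sub, pv_sum_sub]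
  rw [List.sum_map_mul_left]
  -- count term
  have hC : ((List.range row.toList.length).map (fun i => icnt (pvCellN grid rn i == some c))).sum
      = (row.toList.count c : Int) := by
    simp only [pvCellN_eq grid hrow]
    exact pv_sum_count' row.toList c
  -- right neighbours
  have hR : ((List.range row.toList.length).map
      (fun i => icnt (decide (i+1 < pvW0 grid) && ((pvCellN grid rn i == some c) && (pvCellN grid rn (i+1) == some c))))).sum
      = ((List.range (row.toList.length - 1)).map (fun j =>
          if row.toList[j]? = some c ∧ row.toList[j+1]? = some c
          then (if j+1 < pvW0 grid then (1 : Int) else 0) else 0)).sum := by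
    simp only [pvCellN_eq grid hrow]
    have hext : ((List.range row.toList.length).map
        (fun i => icnt (decide (i+1 < pvW0 grid) && ((row.toList[i]? == some c) && (row.toList[i+1]? == some c))))).sum
        = ((List.range (row.toList.length - 1)).map
            (fun i => icnt (decide (i+1 < pvW0 grid) && ((row.toList[i]? == some c) && (row.toList[i+1]? == some c))))).sum := by
      cases hlen : row.toList.length with
      | zero => rfl
      | succ m =>
          rw [Nat.succ_sub_one, pv_sum_top _ m ?_]
          have htl : row.toList[m+1]? = none := by
            rw [List.getElem?_eq_none_iff]
            omega
          rw [htl]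
          simp [icnt]
    rw [hext]
    apply congrArg
    apply List.map_congr_left
    intro j _
    by_cases h1 : row.toList[j]? = some c <;> by_cases h2 : row.toList[j+1]? = some c <;>
      by_cases h3 : j+1 < pvW0 grid <;> simp [h1, h2, h3, icnt]
  -- left neighbours
  have hL : ((List.range row.toList.length).map
      (fun i => icnt (decide (1 ≤ i) && (decide (i-1 < pvW0 grid) && ((pvCellN grid rn (i-1) == some c) && (pvCellN grid rn i == some c)))))).sum
      = ((List.range (row.toList.length - 1)).map (fun j =>
          if row.toList[j]? = some c ∧ row.toList[j+1]? = some c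
          then (if j < pvW0 grid then (1 : Int) else 0) else 0)).sum := by
    simp only [pvCellN_eq grid hrow]
    rw [pv_sum_shift _ _ (by simp [icnt])]
    apply congrArg
    apply List.map_congr_left
    intro j _
    have hd : decide (1 ≤ j+1) = true := by simp
    rw [hd, Bool.true_and, Nat.add_sub_cancel]
    by_cases h1 : row.toList[j]? = some c <;> by_cases h2 : row.toList[j+1]? = some c <;>
      by_cases h3 : j < pvW0 grid <;> simp [h1, h2, h3, icnt]
  -- down neighbours
  have hD : ((List.range row.toList.length).map
      (fun i => icnt (decide (i < pvW0 grid) && ((pvCellN grid rn i == some c) && (pvCellN grid (rn+1) i == some c))))).sum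
      = pvVD (pvW0 grid) grid c rn := by
    simp only [pvCellN_getD grid rn, pvCellN_getD grid (rn+1)]
    rw [pvVD]
    apply pv_countZipW
    have hget : (grid[rn]?.getD "") = row := by rw [hrow]; rfl
    rw [hget]
    omega
  -- up neighbours
  have hU : ((List.range row.toList.length).map
      (fun i => icnt (decide (1 ≤ rn) && (decide (i < pvW0 grid) && ((pvCellN grid (rn-1) i == some c) && (pvCellN grid rn i == some c)))))).sum
      = (if 1 ≤ rn then pvVD (pvW0 grid) grid c (rn-1) else 0) := by
    by_cases hrn1 : 1 ≤ rn
    · rw [if_pos hrn1]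
      have hstep : ∀ i : Nat,
          icnt (decide (1 ≤ rn) && (decide (i < pvW0 grid) && ((pvCellN grid (rn-1) i == some c) && (pvCellN grid rn i == some c))))
          = icnt (decide (i < pvW0 grid) && (((grid[rn-1]?.getD "").toList[i]? == some c) && ((grid[rn]?.getD "").toList[i]? == some c))) := by
        intro i
        rw [decide_eq_true hrn1, Bool.true_and, pvCellN_getD grid (rn-1), pvCellN_getD grid rn]
      simp only [hstep]
      rw [pvVD, Nat.sub_add_cancel hrn1]
      apply pv_countZipW
      have hget : (grid[rn]?.getD "") = row := by rw [hrow]; rfl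
      rw [hget]
      omega
    · rw [if_neg hrn1]
      have hz : rn = 0 := by omega
      apply List.sum_eq_zero
      intro x hx
      rcases List.mem_map.1 hx with ⟨i, _, rfl⟩
      rw [hz]
      simp [icnt]
  rw [hC, hR, hL, hD, hU]
  rw [pvHrow]
  have hsplit : ((List.range (row.toList.length - 1)).map (fun j =>
      if row.toList[j]? = some c ∧ row.toList[j+1]? = some c
      then ((if j < pvW0 grid then (1 : Int) else 0) + (if j+1 < pvW0 grid then (1 : Int) else 0))
      else 0)).sum
      = ((List.range (row.toList.length - 1)).map (fun j =>
          if row.toList[j]? = some c ∧ row.toList[j+1]? = some c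
          then (if j < pvW0 grid then (1 : Int) else 0) else 0)).sum
        + ((List.range (row.toList.length - 1)).map (fun j =>
          if row.toList[j]? = some c ∧ row.toList[j+1]? = some c
          then (if j+1 < pvW0 grid then (1 : Int) else 0) else 0)).sum := by
    rw [← pv_sum_add]
    apply congrArg
    apply List.map_congr_left
    intro j _
    by_cases h1 : row.toList[j]? = some c ∧ row.toList[j+1]? = some c <;> simp [h1]
  rw [hsplit]
  ring

-- vertical sums over the whole grid ---------------------------------------
lemma pv_vd_top (w0 : Nat) (grid : List String) (c : Char) (m : Nat) (hm : grid.length = m + 1) :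
    pvVD w0 grid c m = 0 := by
  have hn : grid[m+1]? = none := by
    rw [List.getElem?_eq_none_iff]; omega
  simp [pvVD, hn]

lemma pv_vsum (w0 : Nat) (grid : List String) (c : Char) :
    ((List.range (grid.length - 1)).map (pvVD w0 grid c)).sum
      = ((grid.zip grid.tail).map
          (fun rr => (((rr.1.toList.take w0).zip (rr.2.toList.take w0)).countP
            (fun p => p.1 == c && p.2 == c) : Int))).sum := by
  induction grid with
  | nil => simp
  | cons s rest ih =>
      cases rest with
      | nil => simp
      | cons s2 t =>
          have hshift : ∀ rn, pvVD w0 (s :: s2 :: t) c (rn + 1) = pvVD w0 (s2 :: t) c rn := by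
            intro rn; simp [pvVD]
          have h0 : pvVD w0 (s :: s2 :: t) c 0
              = (((s.toList.take w0).zip (s2.toList.take w0)).countP
                  (fun p => p.1 == c && p.2 == c) : Int) := by
            simp [pvVD]
          have hlen : (s :: s2 :: t).length - 1 = t.length + 1 := by simp
          rw [hlen, List.range_succ_eq_map]
          simp only [List.map_cons, List.map_map, List.sum_cons, Function.comp_def, hshift, h0]
          have := ih
          simp only [List.length_cons, Nat.add_sub_cancel] at this
          rw [this]
          simp

-- the whole A-side sum ----------------------------------------------------
lemma pv_perSum (grid : List String) (c : Char) :
    ((pvCells grid).map (fun t => if t.2.2 = c then perim_py t.1 t.2.1 grid else 0)).sum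
      = 4 * ((pvVals grid).count c : Int)
        - ((grid.map (fun row => pvHrow (pvW0 grid) row.toList c)).sum)
        - 2 * (((grid.zip grid.tail).map
            (fun rr => (((rr.1.toList.take (pvW0 grid)).zip (rr.2.toList.take (pvW0 grid))).countP
              (fun p => p.1 == c && p.2 == c) : Int))).sum) := by
  rw [pvCells]
  rw [List.map_flatten, List.sum_flatten, List.map_map, List.map_map]
  rw [PySem.List.enumerate_eq_map_pyRange grid "", PySem.List.pyRange_one, List.map_map]
  have hlen : ((PySem.List.len grid : Int) - 0).toNat = grid.length := by
    simp [PySem.List.len_eq]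
  rw [hlen]
  simp only [Function.comp_def, zero_add, PySem.List.pyGetD_natCast, List.map_map]
  have hrows : ∀ rn ∈ List.range grid.length,
      ((PySem.List.enumerate (grid.getD rn "").toList).map
          (fun cv => if cv.2 = c then perim_py ((rn : Nat) : Int) cv.1 grid else 0)).sum
      = 4 * ((grid.getD rn "").toList.count c : Int)
        - pvHrow (pvW0 grid) (grid.getD rn "").toList c
        - pvVD (pvW0 grid) grid c rn - (if 1 ≤ rn then pvVD (pvW0 grid) grid c (rn-1) else 0) := by
    intro rn hrn
    have hrn' : rn < grid.length := List.mem_range.1 hrn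
    have hrow : grid[rn]? = some (grid[rn]'hrn') := List.getElem?_eq_getElem hrn'
    have hgetD : grid.getD rn "" = grid[rn]'hrn' := by
      rw [List.getD_eq_getElem?_getD, hrow, Option.getD_some]
    rw [hgetD]
    rw [PySem.List.enumerate_eq_map_pyRange (grid[rn]'hrn').toList 'a', PySem.List.pyRange_one,
      List.map_map, List.map_map]
    have hlen2 : ((PySem.List.len (grid[rn]'hrn').toList : Int) - 0).toNat
        = (grid[rn]'hrn').toList.length := by
      simp [PySem.List.len_eq]
    rw [hlen2]
    have hpt : ∀ i ∈ List.range (grid[rn]'hrn').toList.length,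
        (((fun cv : Int × Char => if cv.2 = c then perim_py ((rn : Nat) : Int) cv.1 grid else 0) ∘
            (fun j : Int => (j, PySem.List.pyGetD (grid[rn]'hrn').toList j 'a'))) ∘
          (fun k : Nat => (0 : Int) + (k : Int))) i
        = (if (grid[rn]'hrn').toList[i]? = some c then perim_py (rn : Int) (i : Int) grid else 0) := by
      intro i hi
      have hi' : i < (grid[rn]'hrn').toList.length := List.mem_range.1 hi
      simp only [Function.comp_def, zero_add, PySem.List.pyGetD_natCast]
      have hgd : (grid[rn]'hrn').toList.getD i 'a' = (grid[rn]'hrn').toList[i]'hi' := by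
        rw [List.getD_eq_getElem?_getD, List.getElem?_eq_getElem hi', Option.getD_some]
      rw [hgd]
      have hcond : ((grid[rn]'hrn').toList[i]'hi' = c) = ((grid[rn]'hrn').toList[i]? = some c) := by
        rw [List.getElem?_eq_getElem hi']
        exact propext ⟨fun h => by rw [h], fun h => by injection h⟩
      exact if_congr (iff_of_eq hcond) rfl rfl
    rw [List.map_congr_left hpt]
    exact pv_rowContrib grid rn (grid[rn]'hrn') hrow c
  rw [List.map_congr_left hrows]
  rw [pv_sum_sub, pv_sum_sub, pv_sum_sub]
  rw [List.sum_map_mul_left]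
  have hT1 : ((List.range grid.length).map (fun rn => ((grid.getD rn "").toList.count c : Int))).sum
      = ((pvVals grid).count c : Int) := by
    rw [pv_sum_range_getD grid "" (fun row => (row.toList.count c : Int)), pv_cnt_rows]
  have hT2 : ((List.range grid.length).map (fun rn => pvHrow (pvW0 grid) (grid.getD rn "").toList c)).sum
      = (grid.map (fun row => pvHrow (pvW0 grid) row.toList c)).sum :=
    pv_sum_range_getD grid "" (fun row => pvHrow (pvW0 grid) row.toList c)
  have hT3 : ((List.range grid.length).map (fun rn => pvVD (pvW0 grid) grid c rn)).sum
      = ((grid.zip grid.tail).map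
          (fun rr => (((rr.1.toList.take (pvW0 grid)).zip (rr.2.toList.take (pvW0 grid))).countP
            (fun p => p.1 == c && p.2 == c) : Int))).sum := by
    rw [← pv_vsum (pvW0 grid) grid c]
    cases hn : grid.length with
    | zero => rfl
    | succ m => rw [Nat.succ_sub_one, pv_sum_top _ m (pv_vd_top (pvW0 grid) grid c m hn)]
  have hT4 : ((List.range grid.length).map (fun rn => if 1 ≤ rn then pvVD (pvW0 grid) grid c (rn-1) else 0)).sum
      = ((grid.zip grid.tail).map
          (fun rr => (((rr.1.toList.take (pvW0 grid)).zip (rr.2.toList.take (pvW0 grid))).countP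
            (fun p => p.1 == c && p.2 == c) : Int))).sum := by
    rw [pv_sum_shift _ _ (by simp)]
    have hs : ∀ j : Nat, (if 1 ≤ j+1 then pvVD (pvW0 grid) grid c (j+1-1) else 0) = pvVD (pvW0 grid) grid c j := by
      intro j
      rw [if_pos (by omega), Nat.add_sub_cancel]
    simp only [hs]
    exact pv_vsum (pvW0 grid) grid c
  rw [hT1, hT2, hT3, hT4]
  ring

-- keys of the two perimeter dicts ----------------------------------------
lemma pv_cells_map (grid : List String) : (pvCells grid).map (fun t => t.2.2) = pvVals grid := by
  simp only [pvCells, pvVals, List.map_flatten, List.map_map, Function.comp_def,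
    PySem.List.map_snd_enumerate, List.flatMap_def]
  rw [show (fun (x : Int × String) => x.2.toList) = (fun s => s.toList) ∘ (fun x : Int × String => x.2) from rfl,
    ← List.map_map, PySem.List.map_snd_enumerate]

lemma pv_map_key_cells (grid : List String) :
    (pvCells grid).map (fun t => pvKey t.2.2) = pvKeysL grid := by
  rw [pvKeysL, ← pv_cells_map, List.map_map]
  rfl

lemma keys_dPerA (grid : List String) : (dPerA grid).keys = PySem.Set.ofList (pvKeysL grid) := by
  rw [dPerA, PySem.Dict.keys_foldl_modify_key (pvCells grid) (fun t => pvKey t.2.2) 0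
    (fun _ t => (· + perim_py t.1 t.2.1 grid)) PySem.Dict.empty]
  rw [PySem.Dict.keys_empty, PySem.Set.update_nil_left, pv_map_key_cells]

lemma keys_dArea (grid : List String) : (dArea grid).keys = PySem.Set.ofList (pvKeysL grid) := by
  rw [dArea, PySem.Dict.keys_foldl_modify_key (pvVals grid) pvKey 0
    (fun _ _ => (· + 1)) PySem.Dict.empty]
  rw [PySem.Dict.keys_empty, PySem.Set.update_nil_left]
  rfl

lemma pv_update_subset (s : List String) (xs : List String) (h : ∀ x ∈ xs, x ∈ s) :
    PySem.Set.update s xs = s := by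
  rw [PySem.Set.update_eq_append_filter, List.filter_eq_nil_iff.mpr ?_, List.append_nil]
  intro a ha
  have haxs : a ∈ xs := (PySem.Set.mem_ofList _ _).1 ha
  simpa using h a haxs

lemma keys_dPerB1 (grid : List String) : (dPerB1 grid).keys = PySem.Set.ofList (pvKeysL grid) := by
  rw [dPerB1, PySem.Dict.keys_foldl_modify_key ((dArea grid).items) (fun kv => kv.1) 0
    (fun _ kv => (· + 4 * kv.2)) PySem.Dict.empty]
  rw [PySem.Dict.keys_empty, PySem.Set.update_nil_left]
  have : (dArea grid).items.map (fun kv => kv.1) = (dArea grid).keys := rfl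
  rw [this, keys_dArea, PySem.Set.ofList_ofList]

lemma pv_mem_keysL_of_pair (grid : List String) {row : String} (hrow : row ∈ grid)
    {ch : Char} (hch : ch ∈ row.toList) : pvKey ch ∈ pvKeysL grid := by
  exact List.mem_map.2 ⟨ch, List.mem_flatMap.2 ⟨row, hrow, hch⟩, rfl⟩

lemma keys_dPerB3 (grid : List String) : (dPerB3 grid).keys = PySem.Set.ofList (pvKeysL grid) := by
  rw [dPerB3, PySem.Dict.keys_foldl_modify_key _ (fun (p : Char × Char) => pvKey p.1) 0
    (fun _ _ => (· + (-2))) (dPerB2 grid)]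
  rw [dPerB2, PySem.Dict.keys_foldl_modify_key _
    (fun (rj : String × Nat) => pvKey (rj.1.toList.getD rj.2 'a')) 0
    (fun _ _ => (· + (-2))) (dPerB1 grid)]
  rw [keys_dPerB1]
  rw [pv_update_subset, pv_update_subset]
  · intro x hx
    rcases List.mem_map.1 hx with ⟨rj, hrj, rfl⟩
    rcases List.mem_flatten.1 hrj with ⟨sub, hsub, hrjsub⟩
    rcases List.mem_map.1 hsub with ⟨row, hrowg, rfl⟩
    rcases List.mem_map.1 hrjsub with ⟨j, hjf, rfl⟩
    have hj : j < row.toList.length - 1 := List.mem_range.1 (List.mem_of_mem_filter hjf)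
    have hget : row.toList.getD j 'a' ∈ row.toList := by
      rw [List.getD_eq_getElem?_getD, List.getElem?_eq_getElem (by omega), Option.getD_some]
      exact List.getElem_mem _
    exact (PySem.Set.mem_ofList _ _).2 (pv_mem_keysL_of_pair grid hrowg hget)
  · intro x hx
    rcases List.mem_map.1 hx with ⟨p, hp, rfl⟩
    rcases List.mem_flatten.1 hp with ⟨sub, hsub, hpsub⟩
    rcases List.mem_map.1 hsub with ⟨rr, hrrg, rfl⟩
    have hzip : p ∈ rr.1.toList.zip rr.2.toList :=
      List.mem_of_mem_filter hpsub
    have h1' : p.1 ∈ rr.1.toList := (List.of_mem_zip hzip).1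
    have hrow1 : rr.1 ∈ grid := (List.of_mem_zip hrrg).1
    have hmem : pvKey p.1 ∈ PySem.Set.ofList (pvKeysL grid) :=
      (PySem.Set.mem_ofList _ _).2 (pv_mem_keysL_of_pair grid hrow1 h1')
    exact (PySem.Set.mem_update _ _ _).2 (Or.inl hmem)

-- values of the three perimeter passes of B --------------------------------
lemma getD_dPerA (grid : List String) (c : Char) :
    (dPerA grid).getD (pvKey c) 0
      = 4 * ((pvVals grid).count c : Int)
        - ((grid.map (fun row => pvHrow (pvW0 grid) row.toList c)).sum)
        - 2 * (((grid.zip grid.tail).map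
            (fun rr => (((rr.1.toList.take (pvW0 grid)).zip (rr.2.toList.take (pvW0 grid))).countP
              (fun p => p.1 == c && p.2 == c) : Int))).sum) := by
  rw [dPerA, pv_getD_fold (pvCells grid) (fun t => pvKey t.2.2)
    (fun t => perim_py t.1 t.2.1 grid) PySem.Dict.empty (pvKey c)]
  rw [PySem.Dict.getD_empty, zero_add]
  have hcond : ∀ t : Int × Int × Char, (pvKey t.2.2 = pvKey c) = (t.2.2 = c) :=
    fun t => propext ⟨pvKey_inj, fun h => by rw [h]⟩
  simp only [hcond]
  exact pv_perSum grid c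

lemma getD_dPerB3 (grid : List String) (c : Char) (hc : c ∈ pvVals grid) :
    (dPerB3 grid).getD (pvKey c) 0
      = 4 * ((pvVals grid).count c : Int)
        - ((grid.map (fun row => pvHcnt row c)).sum)
        - 2 * (((grid.zip grid.tail).map
            (fun rr => ((rr.1.toList.zip rr.2.toList).countP
              (fun p => p.1 == c && p.2 == c) : Int))).sum) := by
  have harea : dArea grid = PySem.Dict.counter (pvKeysL grid) := by
    rw [PySem.Dict.counter_eq_foldl, pvKeysL, List.foldl_map]
    rfl
  rw [dPerB3, pv_getD_fold _ (fun (p : Char × Char) => pvKey p.1) (fun _ => (-2 : Int))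
    (dPerB2 grid) (pvKey c)]
  rw [dPerB2, pv_getD_fold _ (fun (rj : String × Nat) => pvKey (rj.1.toList.getD rj.2 'a'))
    (fun _ => (-2 : Int)) (dPerB1 grid) (pvKey c)]
  rw [dPerB1, pv_getD_fold _ (fun (kv : String × Int) => kv.1) (fun (kv : String × Int) => 4 * kv.2)
    PySem.Dict.empty (pvKey c)]
  rw [PySem.Dict.getD_empty, zero_add]
  -- area term
  have hS1 : ((dArea grid).items.map (fun kv => if kv.1 = pvKey c then 4 * kv.2 else 0)).sum
      = 4 * ((pvVals grid).count c : Int) := by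
    rw [harea, PySem.Dict.items_counter, List.map_map]
    have hstep : ((PySem.Set.ofList (pvKeysL grid)).map
        ((fun kv : String × Int => if kv.1 = pvKey c then 4 * kv.2 else 0) ∘
          (fun k => (k, (List.count k (pvKeysL grid) : Int))))).sum
        = ((PySem.Set.ofList (pvKeysL grid)).map
            (fun j => if j = pvKey c then 4 * (List.count j (pvKeysL grid) : Int) else 0)).sum := by
      apply congrArg
      apply List.map_congr_left
      intro j _
      by_cases h : j = pvKey c <;> simp [h]
    rw [hstep, pv_sum_dedup _ (PySem.Set.nodup_ofList _) (pvKey c)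
      (fun j => 4 * (List.count j (pvKeysL grid) : Int))]
    have hmem : pvKey c ∈ PySem.Set.ofList (pvKeysL grid) :=
      (PySem.Set.mem_ofList _ _).2 (List.mem_map.2 ⟨c, hc, rfl⟩)
    rw [if_pos hmem, pvKeysL]
    rw [show List.count (pvKey c) ((pvVals grid).map pvKey) = ((pvVals grid).map pvKey).count (pvKey c) from rfl,
      List.count_map_of_injective (pvVals grid) pvKey (fun a b => pvKey_inj) c]
  -- horizontal term
  have hS2 : (((grid.map pvHlist).flatten).map
        (fun rj => if pvKey (rj.1.toList.getD rj.2 'a') = pvKey c then (-2 : Int) else 0)).sum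
      = -((grid.map (fun row => pvHcnt row c)).sum) := by
    rw [List.map_flatten, List.sum_flatten, List.map_map, List.map_map]
    rw [← pv_sum_neg grid (fun row => pvHcnt row c)]
    apply congrArg
    apply List.map_congr_left
    intro row _
    simp only [Function.comp_def, pvHlist, List.map_map, pv_sum_filter]
    rw [pvHcnt, ← pv_sum_neg]
    apply congrArg
    apply List.map_congr_left
    intro j hj
    have hj' : j < row.toList.length - 1 := List.mem_range.1 hj
    have hlt1 : j < row.toList.length := by omega
    have hlt2 : j + 1 < row.toList.length := by omega
    have hg1 : row.toList.getD j 'a' = row.toList[j]'hlt1 := by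
      rw [List.getD_eq_getElem?_getD, List.getElem?_eq_getElem hlt1, Option.getD_some]
    have hg2 : row.toList.getD (j+1) 'a' = row.toList[j+1]'hlt2 := by
      rw [List.getD_eq_getElem?_getD, List.getElem?_eq_getElem hlt2, Option.getD_some]
    have ho1 : row.toList[j]? = some (row.toList[j]'hlt1) := List.getElem?_eq_getElem hlt1
    have ho2 : row.toList[j+1]? = some (row.toList[j+1]'hlt2) := List.getElem?_eq_getElem hlt2
    rw [hg1, hg2, ho1, ho2]
    simp only [Option.some.injEq]
    have hki : (pvKey (row.toList[j]'hlt1) = pvKey c) ↔ (row.toList[j]'hlt1 = c) :=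
      ⟨pvKey_inj, fun h => by rw [h]⟩
    have hki2 : (pvKey (row.toList[j+1]'hlt2) = pvKey c) ↔ (row.toList[j+1]'hlt2 = c) :=
      ⟨pvKey_inj, fun h => by rw [h]⟩
    by_cases hab : row.toList[j]'hlt1 = row.toList[j+1]'hlt2
    · by_cases hac : row.toList[j]'hlt1 = c
      · have hbc : row.toList[j+1]'hlt2 = c := by rw [← hab]; exact hac
        simp [hab, hac, hbc, hki]
      · have hbc : ¬ (row.toList[j+1]'hlt2 = c) := fun h => hac (hab.trans h)
        simp [hab, hki, hki2, hac, hbc]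
    · have hno : ¬ (row.toList[j]'hlt1 = c ∧ row.toList[j+1]'hlt2 = c) := by
        rintro ⟨x, y⟩
        exact hab (by rw [x, y])
      simp [hab, hno]
  -- vertical term
  have hS3 : ((((grid.zip grid.tail).map
        (fun rr => pvEqPairs rr.1.toList rr.2.toList)).flatten).map
        (fun p => if pvKey p.1 = pvKey c then (-2 : Int) else 0)).sum
      = -2 * (((grid.zip grid.tail).map
          (fun rr => ((rr.1.toList.zip rr.2.toList).countP
            (fun p => p.1 == c && p.2 == c) : Int))).sum) := by
    rw [pv_sum_ite_const _ (fun p : Char × Char => pvKey p.1 = pvKey c) (-2)]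
    rw [List.countP_flatten, List.map_map]
    have : ((grid.zip grid.tail).map ((fun l => List.countP (fun p : Char × Char => decide (pvKey p.1 = pvKey c)) l)
          ∘ (fun rr => pvEqPairs rr.1.toList rr.2.toList)))
        = (grid.zip grid.tail).map (fun rr => (rr.1.toList.zip rr.2.toList).countP
            (fun p => p.1 == c && p.2 == c)) := by
      apply List.map_congr_left
      intro rr _
      exact pv_cntP_pairs rr.1.toList rr.2.toList c
    rw [this, Nat.cast_list_sum, List.map_map]
    rfl
  rw [hS1, hS2, hS3]
  ring

-- under Pre_, the window-clamped sums of A equal the unclamped sums of B ----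
lemma pvHrow_eq_pvHcnt (grid : List String) (row : String) (hrow : row ∈ grid)
    (hp : ∀ j ∈ List.range (row.toList.length - 1),
        row.toList[j]? = row.toList[j+1]? → j + 1 < pvW0 grid) (c : Char) :
    pvHrow (pvW0 grid) row.toList c = pvHcnt row c := by
  rw [pvHrow, pvHcnt]
  apply congrArg
  apply List.map_congr_left
  intro j hj
  by_cases h1 : row.toList[j]? = some c ∧ row.toList[j+1]? = some c
  · have heq : row.toList[j]? = row.toList[j+1]? := by rw [h1.1, h1.2]
    have hlt : j + 1 < pvW0 grid := hp j hj heq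
    rw [if_pos h1, if_pos h1, if_pos (by omega : j < pvW0 grid), if_pos hlt]
    norm_num
  · rw [if_neg h1, if_neg h1]

lemma pv_countP_take_eq (l1 l2 : List Char) (w0 : Nat)
    (hp : ∀ j ∈ List.range (min l1.length l2.length), l1[j]? = l2[j]? → j < w0) (c : Char) :
    (((l1.take w0).zip (l2.take w0)).countP (fun p => p.1 == c && p.2 == c) : Int)
      = ((l1.zip l2).countP (fun p => p.1 == c && p.2 == c) : Int) := by
  have hz : (l1.take w0).zip (l2.take w0) = (l1.zip l2).take w0 := by
    rw [List.zip_eq_zipWith, List.zip_eq_zipWith, List.take_zipWith]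
  rw [hz]
  have hsplit : l1.zip l2 = (l1.zip l2).take w0 ++ (l1.zip l2).drop w0 :=
    (List.take_append_drop w0 (l1.zip l2)).symm
  conv_rhs => rw [hsplit]
  rw [List.countP_append]
  have hdrop : ((l1.zip l2).drop w0).countP (fun p => p.1 == c && p.2 == c) = 0 := by
    rw [List.countP_eq_zero]
    intro p hpmem
    rcases List.mem_iff_getElem.1 hpmem with ⟨k, hk, hget⟩
    have hk' : w0 + k < (l1.zip l2).length := by
      have := hk
      rw [List.length_drop] at this
      omega
    have hidx : (l1.zip l2)[w0 + k]'hk' = p := by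
      rw [← hget, List.getElem_drop]
    have hkmin : w0 + k < min l1.length l2.length := by
      rw [List.length_zip] at hk'
      omega
    have h1 : l1[w0 + k]'(by omega) = p.1 ∧ l2[w0 + k]'(by omega) = p.2 := by
      have := hidx
      rw [List.getElem_zip] at this
      exact ⟨congrArg Prod.fst this, congrArg Prod.snd this⟩
    intro hpc
    have hc1 : p.1 = c := by
      have := congrArg (fun b => b = true) (congrArg (fun x => x) hpc)
      simp at hpc
      exact hpc.1
    have hc2 : p.2 = c := by
      simp at hpc
      exact hpc.2
    have heq : l1[w0 + k]? = l2[w0 + k]? := by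
      rw [List.getElem?_eq_getElem (by omega), List.getElem?_eq_getElem (by omega)]
      rw [h1.1, h1.2, hc1, hc2]
    have := hp (w0 + k) (List.mem_range.2 hkmin) heq
    omega
  rw [hdrop]
  push_cast
  ring

-- ===== VERDICT (by name: the statement is the Claim_ definition above) =====
theorem calc_py_spec : Claim_equal_calc_py := by
  intro grid _ hpre
  obtain ⟨hp1, hp2, hp3⟩ := hpre
  unfold Spec_calc_py
  rw [calc_py_eq, calc_py_alt_eq]
  refine Prod.ext rfl ?_
  show (dPerA grid).items = (dPerB3 grid).items
  have hndA : (dPerA grid).keys.Nodup := by rw [keys_dPerA]; exact PySem.Set.nodup_ofList _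
  have hndB : (dPerB3 grid).keys.Nodup := by rw [keys_dPerB3]; exact PySem.Set.nodup_ofList _
  rw [PySem.Dict.items_eq_map_keys _ hndA 0, PySem.Dict.items_eq_map_keys _ hndB 0,
    keys_dPerA, keys_dPerB3]
  apply List.map_congr_left
  intro k hk
  have hk2 : k ∈ pvKeysL grid := (PySem.Set.mem_ofList _ _).1 hk
  rcases List.mem_map.1 hk2 with ⟨c, hc, rfl⟩
  rw [getD_dPerA grid c, getD_dPerB3 grid c hc]
  have hH : (grid.map (fun row => pvHrow (pvW0 grid) row.toList c)).sum
      = (grid.map (fun row => pvHcnt row c)).sum := by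
    apply congrArg
    apply List.map_congr_left
    intro row hrow
    exact pvHrow_eq_pvHcnt grid row hrow (hp2 row hrow) c
  have hV : ((grid.zip grid.tail).map
        (fun rr => (((rr.1.toList.take (pvW0 grid)).zip (rr.2.toList.take (pvW0 grid))).countP
          (fun p => p.1 == c && p.2 == c) : Int))).sum
      = ((grid.zip grid.tail).map
          (fun rr => ((rr.1.toList.zip rr.2.toList).countP
            (fun p => p.1 == c && p.2 == c) : Int))).sum := by
    apply congrArg
    apply List.map_congr_left
    intro rr hrr
    exact pv_countP_take_eq rr.1.toList rr.2.toList (pvW0 grid) (hp3 rr hrr) c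
  rw [hH, hV]
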